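-- pv_equiv track=rewrite | github.com/daizhou-xd/MemoryTreeVLA | eval.py | compute_boundary_matches
-- ===== SOURCE A (Python) =====
-- from typing import Dict, List, Optional, Tuple
--
-- def compute_boundary_matches(
--     branch_steps: List[int],
--     gt_boundaries: List[int],
--     tol: int,
-- ) -> Tuple[int, int, int]:
--     """
--     Compute TP, FP, FN for boundary detection with ±tol tolerance.
--
--     Returns (tp, fp, fn).
--     """
--     matched_gt  = set()
--     matched_pred = set()
--
--     for bi, gt in enumerate(gt_boundaries):
--         for pi, pr in enumerate(branch_steps):
--             if abs(pr - gt) <= tol and bi not in matched_gt and pi not in matched_pred: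
--                 matched_gt.add(bi)
--                 matched_pred.add(pi)
--                 break
--
--     tp = len(matched_gt)
--     fp = len(branch_steps) - len(matched_pred)
--     fn = len(gt_boundaries) - tp
--     return tp, fp, fn
-- ===== SOURCE B (Python) =====
-- from typing import List, Tuple
--
--
-- def compute_boundary_matches(
--     branch_steps: List[int],
--     gt_boundaries: List[int],
--     tol: int,
-- ) -> Tuple[int, int, int]:
--     """
--     Compute TP, FP, FN for boundary detection with +-tol tolerance.
--
--     Keeps the still-unmatched predictions in a shrinking list (in original
--     index order) and pops each one as it is matched, so matched predictions
--     are never re-scanned; only a single match counter is maintained.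
--     """
--     avail = list(branch_steps)  # unmatched predictions, original order
--     tp = 0
--     for gt in gt_boundaries:
--         for k, pr in enumerate(avail):
--             if abs(pr - gt) <= tol:
--                 avail.pop(k)
--                 tp += 1
--                 break
--     return tp, len(branch_steps) - tp, len(gt_boundaries) - tp
-- ===== Notes on version B (the rewrite author's own statement) =====
-- stated objective: faster
-- what changed: B replaces A's two matched-index sets and full rescans of all predictions with a shrinking list of still-unmatched predictions (pop on match) and a single match counter, so matched predictions are never re-scanned and fp/fn come from that one counter.
import Mathlib
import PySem

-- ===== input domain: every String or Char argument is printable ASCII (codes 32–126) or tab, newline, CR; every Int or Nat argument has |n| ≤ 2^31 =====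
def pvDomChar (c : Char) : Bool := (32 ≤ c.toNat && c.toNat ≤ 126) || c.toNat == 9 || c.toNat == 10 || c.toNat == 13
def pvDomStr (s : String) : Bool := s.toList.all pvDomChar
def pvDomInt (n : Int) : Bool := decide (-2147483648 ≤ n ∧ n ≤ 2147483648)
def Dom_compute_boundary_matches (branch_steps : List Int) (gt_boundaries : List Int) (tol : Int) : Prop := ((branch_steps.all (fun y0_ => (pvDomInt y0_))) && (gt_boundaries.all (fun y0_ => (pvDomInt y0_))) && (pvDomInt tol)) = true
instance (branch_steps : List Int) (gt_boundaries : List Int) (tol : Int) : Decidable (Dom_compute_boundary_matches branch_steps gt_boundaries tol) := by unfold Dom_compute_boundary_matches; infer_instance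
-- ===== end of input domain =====

-- B keeps the still-unmatched predictions in a shrinking list (popping each matched one)
-- with a single match counter, instead of A's two matched-index sets and full rescans;
-- the equivalence is about the return value (tp, fp, fn), rendered as a 3-element list.

-- ===== PORT A =====
-- inner loop: 'for pi, pr in enumerate(branch_steps): if …: add; add; break'
def pvA_inner (gt tol bi : Int) (mg mp : PySem.Set Int) : List (Int × Int) → PySem.Set Int × PySem.Set Int
  | [] => (mg, mp)
  | (pi, pr) :: rest =>
    if |pr - gt| ≤ tol ∧ mg.contains bi = false ∧ mp.contains pi = false then
      (mg.add bi, mp.add pi)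
    else pvA_inner gt tol bi mg mp rest

-- outer loop: 'for bi, gt in enumerate(gt_boundaries): …'
def pvA_outer (tol : Int) (eps : List (Int × Int)) : List (Int × Int) → PySem.Set Int × PySem.Set Int → PySem.Set Int × PySem.Set Int
  | [], st => st
  | (bi, gt) :: gs, (mg, mp) => pvA_outer tol eps gs (pvA_inner gt tol bi mg mp eps)

def compute_boundary_matches (branch_steps : List Int) (gt_boundaries : List Int) (tol : Int) : List Int :=
  let st := pvA_outer tol (PySem.List.enumerate branch_steps) (PySem.List.enumerate gt_boundaries) (PySem.Set.empty, PySem.Set.empty)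
  [PySem.Set.len st.1, (branch_steps.length : Int) - PySem.Set.len st.2, (gt_boundaries.length : Int) - PySem.Set.len st.1]

-- ===== PORT B =====
-- 'for k, pr in enumerate(avail): if abs(pr-gt) <= tol: avail.pop(k); break' — find-and-pop the
-- first still-available prediction within tolerance.
def pvB_remove? (gt tol : Int) : List Int → Option (List Int)
  | [] => none
  | p :: rest => if |p - gt| ≤ tol then some rest else (pvB_remove? gt tol rest).map (p :: ·)

-- 'for gt in gt_boundaries: …' over the state (avail, tp)
def pvB_loop (tol : Int) : List Int → List Int × Int → List Int × Int
  | [], st => st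
  | g :: gs, (avail, tp) =>
    pvB_loop tol gs
      (match pvB_remove? g tol avail with
       | some a => (a, tp + 1)
       | none => (avail, tp))

def compute_boundary_matches_alt (branch_steps : List Int) (gt_boundaries : List Int) (tol : Int) : List Int :=
  let st := pvB_loop tol gt_boundaries (branch_steps, 0)
  [st.2, (branch_steps.length : Int) - st.2, (gt_boundaries.length : Int) - st.2]

-- ===== PRECONDITION & SPEC =====
def Spec_compute_boundary_matches (branch_steps : List Int) (gt_boundaries : List Int) (tol : Int) (out : List Int) : Prop := out = compute_boundary_matches_alt branch_steps gt_boundaries tol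
instance (branch_steps : List Int) (gt_boundaries : List Int) (tol : Int) (out : List Int) : Decidable (Spec_compute_boundary_matches branch_steps gt_boundaries tol out) := by unfold Spec_compute_boundary_matches; infer_instance

-- ===== CLAIM (what is proved, stated in full; the proofs are below) =====
def Claim_equal_compute_boundary_matches : Prop := ∀ (branch_steps : List Int) (gt_boundaries : List Int) (tol : Int), Dom_compute_boundary_matches branch_steps gt_boundaries tol → Spec_compute_boundary_matches branch_steps gt_boundaries tol (compute_boundary_matches branch_steps gt_boundaries tol)

-- ===== LEMMAS AND PROOFS =====

-- the values of the still-unmatched predictions, in original index order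
def pvF (mp : PySem.Set Int) (l : List (Int × Int)) : List Int :=
  (l.filter (fun x => mp.contains x.1 = false)).map Prod.snd

lemma pv_contains_false {s : PySem.Set Int} {x : Int} : s.contains x = false ↔ x ∉ s := by
  simp [PySem.Set.contains]

lemma pv_length_add {s : PySem.Set Int} {x : Int} (h : x ∉ s) :
    (s.add x).length = s.length + 1 := by
  simp [PySem.Set.add, PySem.Set.contains, h]

lemma pv_inner_key (gt tol bi : Int) (mg mp : PySem.Set Int) (l : List (Int × Int))
    (hnd : (l.map Prod.fst).Nodup) (hbi : mg.contains bi = false) :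
    (pvB_remove? gt tol (pvF mp l) = none ∧ pvA_inner gt tol bi mg mp l = (mg, mp))
    ∨ ∃ pi, pi ∈ l.map Prod.fst ∧ mp.contains pi = false ∧
        pvA_inner gt tol bi mg mp l = (mg.add bi, mp.add pi) ∧
        pvB_remove? gt tol (pvF mp l) = some (pvF (mp.add pi) l) := by
  have hbi' : bi ∉ mg := pv_contains_false.1 hbi
  induction l with
  | nil =>
    left
    constructor <;> simp [pvF, pvB_remove?, pvA_inner]
  | cons hd tl ih =>
    obtain ⟨pi, pr⟩ := hd
    simp only [List.map_cons, List.nodup_cons] at hnd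
    by_cases hmem : pi ∈ mp
    · -- head prediction already matched: A skips it, and it is filtered out of avail
      have hA : pvA_inner gt tol bi mg mp ((pi, pr) :: tl) = pvA_inner gt tol bi mg mp tl := by
        simp [pvA_inner, hmem]
      have hF : pvF mp ((pi, pr) :: tl) = pvF mp tl := by
        simp [pvF, hmem]
      rcases ih hnd.2 with ⟨hn, ha⟩ | ⟨pj, hpj, hpjm, ha, hb⟩
      · exact Or.inl ⟨by rw [hF]; exact hn, by rw [hA]; exact ha⟩
      · refine Or.inr ⟨pj, by simp only [List.map_cons]; exact List.mem_cons_of_mem _ hpj, hpjm,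
          by rw [hA]; exact ha, ?_⟩
        have hdrop : pvF (mp.add pj) ((pi, pr) :: tl) = pvF (mp.add pj) tl := by
          simp [pvF, PySem.Set.mem_add, hmem]
        rw [hF, hdrop]
        exact hb
    · by_cases htol : |pr - gt| ≤ tol
      · -- head prediction available and within tolerance: A matches it, B pops it
        right
        refine ⟨pi, by simp, pv_contains_false.2 hmem, ?_, ?_⟩
        · simp [pvA_inner, htol, hbi', hmem]
        · have h1 : pvF mp ((pi, pr) :: tl) = pr :: pvF mp tl := by
            simp [pvF, hmem]
          have h2 : pvF (mp.add pi) ((pi, pr) :: tl) = pvF mp tl := by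
            simp only [pvF, List.filter_cons]
            have hc : ((mp.add pi).contains pi = false) = False := by
              simp [PySem.Set.mem_add]
            rw [show (decide ((mp.add pi).contains pi = false)) = false by simp [PySem.Set.contains, PySem.Set.mem_add]]
            simp only [Bool.false_eq_true, if_false]
            congr 1
            apply List.filter_congr
            intro x hx
            have hne : x.1 ≠ pi := fun h => hnd.1 (h ▸ List.mem_map_of_mem hx)
            simp [PySem.Set.mem_add, hne]
          rw [h1, h2, pvB_remove?]
          simp [htol]
      · -- head within avail but out of tolerance: both skip it
        have hA : pvA_inner gt tol bi mg mp ((pi, pr) :: tl) = pvA_inner gt tol bi mg mp tl := by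
          simp [pvA_inner, htol]
        have hF : pvF mp ((pi, pr) :: tl) = pr :: pvF mp tl := by
          simp [pvF, hmem]
        rcases ih hnd.2 with ⟨hn, ha⟩ | ⟨pj, hpj, hpjm, ha, hb⟩
        · refine Or.inl ⟨?_, by rw [hA]; exact ha⟩
          rw [hF, pvB_remove?]
          simp [htol, hn]
        · refine Or.inr ⟨pj, by simp only [List.map_cons]; exact List.mem_cons_of_mem _ hpj, hpjm,
            by rw [hA]; exact ha, ?_⟩
          have hne : pi ≠ pj := fun h => hnd.1 (h ▸ hpj)
          have hkeep : pvF (mp.add pj) ((pi, pr) :: tl) = pr :: pvF (mp.add pj) tl := by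
            simp [pvF, PySem.Set.mem_add, hmem, hne]
          rw [hF, hkeep, pvB_remove?]
          simp [htol, hb]

lemma pv_outer_key (tol : Int) (l : List (Int × Int)) (hnd : (l.map Prod.fst).Nodup) :
    ∀ (gs : List (Int × Int)) (mg mp : PySem.Set Int) (tp : Int),
    (∀ p ∈ gs, mg.contains p.1 = false) →
    ((gs.map Prod.fst).Pairwise (· < ·)) →
    tp = (mg.length : Int) → mg.length = mp.length →
    pvB_loop tol (gs.map Prod.snd) (pvF mp l, tp)
        = (pvF (pvA_outer tol l gs (mg, mp)).2 l, ((pvA_outer tol l gs (mg, mp)).1.length : Int))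
      ∧ (pvA_outer tol l gs (mg, mp)).1.length = (pvA_outer tol l gs (mg, mp)).2.length := by
  intro gs
  induction gs with
  | nil =>
    intro mg mp tp _ _ htp hlen
    simpa [pvA_outer, pvB_loop, htp] using hlen
  | cons hd gs ih =>
    obtain ⟨bi, g⟩ := hd
    intro mg mp tp hfresh hpair htp hlen
    have hbi : mg.contains bi = false := hfresh (bi, g) (List.mem_cons_self ..)
    simp only [List.map_cons, List.pairwise_cons] at hpair
    rcases pv_inner_key g tol bi mg mp l hnd hbi with ⟨hn, ha⟩ | ⟨pi, hpi, hpim, ha, hb⟩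
    · have hstep : pvA_outer tol l ((bi, g) :: gs) (mg, mp) = pvA_outer tol l gs (mg, mp) := by
        simp [pvA_outer, ha]
      have hBstep : pvB_loop tol (((bi, g) :: gs).map Prod.snd) (pvF mp l, tp)
          = pvB_loop tol (gs.map Prod.snd) (pvF mp l, tp) := by
        simp [pvB_loop, hn]
      rw [hstep, hBstep]
      exact ih mg mp tp (fun p hp => hfresh p (List.mem_cons_of_mem _ hp)) hpair.2 htp hlen
    · have hbim : bi ∉ mg := pv_contains_false.1 hbi
      have hpim' : pi ∉ mp := pv_contains_false.1 hpim
      have hstep : pvA_outer tol l ((bi, g) :: gs) (mg, mp)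
          = pvA_outer tol l gs (mg.add bi, mp.add pi) := by
        simp [pvA_outer, ha]
      have hBstep : pvB_loop tol (((bi, g) :: gs).map Prod.snd) (pvF mp l, tp)
          = pvB_loop tol (gs.map Prod.snd) (pvF (mp.add pi) l, tp + 1) := by
        simp [pvB_loop, hb]
      rw [hstep, hBstep]
      refine ih (mg.add bi) (mp.add pi) (tp + 1) ?_ hpair.2 ?_ ?_
      · intro p hp
        rw [pv_contains_false, PySem.Set.mem_add]
        rintro (h | h)
        · exact pv_contains_false.1 (hfresh p (List.mem_cons_of_mem _ hp)) h
        · exact absurd (h ▸ hpair.1 p.1 (List.mem_map_of_mem hp)) (lt_irrefl _)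
      · rw [pv_length_add hbim]
        push_cast
        omega
      · rw [pv_length_add hbim, pv_length_add hpim', hlen]

-- ===== VERDICT (by name: the statement is the Claim_ definition above) =====
theorem compute_boundary_matches_spec : Claim_equal_compute_boundary_matches := by
  intro bs gts tol _
  unfold Spec_compute_boundary_matches compute_boundary_matches compute_boundary_matches_alt
  have hnd : ((PySem.List.enumerate bs).map Prod.fst).Nodup :=
    List.pairwise_map.2 ((PySem.List.pairwise_lt_enumerate bs 0).imp fun h => ne_of_lt h)
  have hpair : ((PySem.List.enumerate gts).map Prod.fst).Pairwise (· < ·) :=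
    List.pairwise_map.2 (PySem.List.pairwise_lt_enumerate gts 0)
  have h := pv_outer_key tol (PySem.List.enumerate bs) hnd (PySem.List.enumerate gts)
    PySem.Set.empty PySem.Set.empty 0
    (fun p _ => by simp [PySem.Set.empty, PySem.Set.contains]) hpair (by simp [PySem.Set.empty]) rfl
  rw [PySem.List.map_snd_enumerate] at h
  have hF0 : pvF PySem.Set.empty (PySem.List.enumerate bs) = bs := by
    simp [pvF, PySem.Set.empty, PySem.Set.contains, PySem.List.map_snd_enumerate]
  rw [hF0] at h
  obtain ⟨h1, h2⟩ := h
  simp only [h1, PySem.Set.len, h2]
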